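-- pv_equiv track=rewrite | github.com/bryntje/alphapy | utils/embed_parser.py | extract_fields_from_lines
-- ===== SOURCE A (Python) =====
-- from typing import Dict, List, Optional, Tuple
--
-- def extract_fields_from_lines(
--     lines: List[str],
-- ) -> Tuple[Optional[str], Optional[str], Optional[str], Optional[str]]:
--     """Extract date, time, location, and days fields from structured embed lines."""
--     date_line = time_line = location_line = days_line = None
--     for line in lines:
--         lower = line.lower()
--         if "date:" in lower:
--             date_line = line.split(":", 1)[1].strip()
--         elif "time:" in lower:
--             time_line = line.split(":", 1)[1].strip()
--         elif "location:" in lower or "locatie:" in lower: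
--             location_line = line.split(":", 1)[1].strip()
--         elif "days:" in lower:
--             days_line = line.split(":", 1)[1].strip()
--     return date_line, time_line, location_line, days_line
-- ===== SOURCE B (Python) =====
-- def extract_fields_from_lines(lines):
--     """Extract date, time, location, and days fields from structured embed lines."""
--
--     def classify(low):
--         # which field a line would set (elif priority: date, time, location, days)
--         if "date:" in low:
--             return 0
--         if "time:" in low:
--             return 1
--         if "location:" in low or "locatie:" in low:
--             return 2
--         if "days:" in low:
--             return 3
--         return None
--
--     def last_for(idx):
--         # last write wins: search backwards for the most recent line of this field
--         for line in reversed(lines):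
--             if classify(line.lower()) == idx:
--                 return line.split(":", 1)[1].strip()
--         return None
--
--     return (last_for(0), last_for(1), last_for(2), last_for(3))
-- ===== Notes on version B (the rewrite author's own statement) =====
-- stated objective: alternative
-- what changed: B replaces A's single forward stateful scan with four independent per-field backward searches: each field is the first matching line found when scanning the list in reverse (last write wins), with a shared classifier encoding the elif priority.
import Mathlib
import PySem

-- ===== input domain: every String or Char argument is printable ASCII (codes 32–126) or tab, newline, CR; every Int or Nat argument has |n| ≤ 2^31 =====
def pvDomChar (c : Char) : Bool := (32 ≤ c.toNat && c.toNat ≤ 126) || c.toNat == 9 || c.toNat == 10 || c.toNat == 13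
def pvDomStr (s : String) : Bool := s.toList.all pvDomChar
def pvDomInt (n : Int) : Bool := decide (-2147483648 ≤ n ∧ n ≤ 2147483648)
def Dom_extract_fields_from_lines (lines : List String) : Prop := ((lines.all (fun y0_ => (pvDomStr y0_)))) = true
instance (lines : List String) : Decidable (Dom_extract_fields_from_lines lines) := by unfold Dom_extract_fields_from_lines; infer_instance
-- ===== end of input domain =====

-- B replaces A's forward stateful scan by four per-field backward searches (last write wins); 'alternative', same cost.

-- ===== PORT A =====
-- line.split(":", 1)[1].strip() — evaluated only under a branch guaranteeing ':' ∈ line, so the getD defaults are unreachable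
def pvCutColon (line : String) : String :=
  PySem.Str.strip (((PySem.Str.splitMax? line ":" 1).getD []).getD 1 "")

def pvStepA (st : Option String × Option String × Option String × Option String) (line : String) :
    Option String × Option String × Option String × Option String :=
  let lower := PySem.Str.lower line
  if PySem.Str.isIn "date:" lower then (some (pvCutColon line), st.2.1, st.2.2.1, st.2.2.2)
  else if PySem.Str.isIn "time:" lower then (st.1, some (pvCutColon line), st.2.2.1, st.2.2.2)
  else if PySem.Str.isIn "location:" lower || PySem.Str.isIn "locatie:" lower then
    (st.1, st.2.1, some (pvCutColon line), st.2.2.2)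
  else if PySem.Str.isIn "days:" lower then (st.1, st.2.1, st.2.2.1, some (pvCutColon line))
  else st

def extract_fields_from_lines (lines : List String) : Option String × Option String × Option String × Option String :=
  lines.foldl pvStepA (none, none, none, none)

-- ===== PORT B =====
-- which field a line would set (elif priority: date, time, location, days)
def pvClassify (low : String) : Option Nat :=
  if PySem.Str.isIn "date:" low then some 0
  else if PySem.Str.isIn "time:" low then some 1
  else if PySem.Str.isIn "location:" low || PySem.Str.isIn "locatie:" low then some 2
  else if PySem.Str.isIn "days:" low then some 3
  else none

-- 'for line in reversed(lines): if classify(...)==idx: return cut(line); return None'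
def pvLastFor (lines : List String) (idx : Nat) : Option String :=
  match lines.reverse.find? (fun line => pvClassify (PySem.Str.lower line) == some idx) with
  | some line => some (pvCutColon line)
  | none => none

def extract_fields_from_lines_alt (lines : List String) : Option String × Option String × Option String × Option String :=
  (pvLastFor lines 0, pvLastFor lines 1, pvLastFor lines 2, pvLastFor lines 3)

-- ===== PRECONDITION & SPEC =====
def Spec_extract_fields_from_lines (lines : List String) (out : Option String × Option String × Option String × Option String) : Prop := out = extract_fields_from_lines_alt lines
instance (lines : List String) (out : Option String × Option String × Option String × Option String) : Decidable (Spec_extract_fields_from_lines lines out) := by unfold Spec_extract_fields_from_lines; infer_instance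

-- ===== CLAIM (what is proved, stated in full; the proofs are below) =====
def Claim_equal_extract_fields_from_lines : Prop := ∀ (lines : List String), Dom_extract_fields_from_lines lines → Spec_extract_fields_from_lines lines (extract_fields_from_lines lines)

-- ===== LEMMAS AND PROOFS =====
-- generalised backward search with default (the running state component)
def pvG (lines : List String) (i : Nat) (d : Option String) : Option String :=
  match lines.reverse.find? (fun line => pvClassify (PySem.Str.lower line) == some i) with
  | some line => some (pvCutColon line)
  | none => d

theorem pvG_cons (l : String) (t : List String) (i : Nat) (d : Option String) :
    pvG (l :: t) i d = pvG t i (if pvClassify (PySem.Str.lower l) == some i then some (pvCutColon l) else d) := by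
  simp only [pvG, List.reverse_cons, List.find?_append]
  cases h : t.reverse.find? (fun line => pvClassify (PySem.Str.lower line) == some i) with
  | some v => simp [h]
  | none =>
      simp only [h, Option.none_or, List.find?]
      cases hc : (pvClassify (PySem.Str.lower l) == some i) <;> simp [hc]

theorem pvStepA_proj (st : Option String × Option String × Option String × Option String) (l : String) :
    pvStepA st l =
      ((if pvClassify (PySem.Str.lower l) == some 0 then some (pvCutColon l) else st.1),
       (if pvClassify (PySem.Str.lower l) == some 1 then some (pvCutColon l) else st.2.1),
       (if pvClassify (PySem.Str.lower l) == some 2 then some (pvCutColon l) else st.2.2.1),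
       (if pvClassify (PySem.Str.lower l) == some 3 then some (pvCutColon l) else st.2.2.2)) := by
  simp only [pvStepA, pvClassify]
  split_ifs <;> simp_all

theorem pvFold_eq (lines : List String) (st : Option String × Option String × Option String × Option String) :
    lines.foldl pvStepA st = (pvG lines 0 st.1, pvG lines 1 st.2.1, pvG lines 2 st.2.2.1, pvG lines 3 st.2.2.2) := by
  induction lines generalizing st with
  | nil => simp [pvG]
  | cons l t ih =>
      simp only [List.foldl_cons, ih, pvStepA_proj, pvG_cons]

-- ===== VERDICT (by name: the statement is the Claim_ definition above) =====
theorem extract_fields_from_lines_spec : Claim_equal_extract_fields_from_lines := by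
  intro lines _
  unfold Spec_extract_fields_from_lines extract_fields_from_lines extract_fields_from_lines_alt
  rw [pvFold_eq]
  rfl
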